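-- pv_equiv track=rewrite | github.com/bratao/PySeqLab | pyseqlab/features_extraction.py | _validate_template
-- ===== SOURCE A (Python) =====
-- def _validate_template(template):
--     """validate passed template
--
--        Args:
--            template: a tuple comprising the order of y pattern (i.e. (-2,-1,0))
--
--     """
--     check = True
--     if(len(template) > 1):
--         for i in range(len(template)-1):
--             curr_elem = template[i]
--             next_elem = template[i+1]
--             diff = curr_elem - next_elem
--             if(diff != -1):
--                 check = False
--                 break
--     else:
--         if(template[0] != 0):
--             check = False
--     return(check)
-- ===== SOURCE B (Python) =====
-- def _validate_template(template):
--     if len(template) > 1: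
--         expected = [template[0] + i for i in range(len(template))]
--         return list(template) == expected
--     else:
--         return template[0] == 0
-- ===== Notes on version B (the rewrite author's own statement) =====
-- stated objective: simpler
-- what changed: Replaces the adjacent-difference scan with early break by constructing the canonical consecutive sequence anchored at template[0] and comparing for list equality.
import Mathlib
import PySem

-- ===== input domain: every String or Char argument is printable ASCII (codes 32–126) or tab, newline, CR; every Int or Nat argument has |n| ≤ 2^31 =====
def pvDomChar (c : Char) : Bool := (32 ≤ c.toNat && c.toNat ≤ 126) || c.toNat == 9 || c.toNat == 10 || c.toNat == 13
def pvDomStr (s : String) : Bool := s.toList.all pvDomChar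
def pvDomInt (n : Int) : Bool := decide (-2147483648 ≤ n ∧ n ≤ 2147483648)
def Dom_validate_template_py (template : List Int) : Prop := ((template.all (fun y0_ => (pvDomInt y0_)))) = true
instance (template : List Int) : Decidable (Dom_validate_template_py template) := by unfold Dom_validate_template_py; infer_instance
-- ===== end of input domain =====

-- B replaces A's adjacent-difference scan (with early break) by building the expected
-- consecutive sequence anchored at the first element and comparing for equality: simpler.

-- ===== PORT A =====
-- the for-loop over range(len(template)-1) with break: i is the current index, n the
-- remaining number of iterations; 'false' is the break-with-check=False path
def aLoop (t : List Int) (i : Nat) : Nat → Bool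
  | 0 => true
  | n + 1 =>
    let curr := (PySem.List.pyGet? t (i : Int)).getD 0
    let next := (PySem.List.pyGet? t ((i : Int) + 1)).getD 0
    let diff := curr - next
    if diff ≠ -1 then false else aLoop t (i + 1) n

def validate_template_py (template : List Int) : Bool :=
  if template.length > 1 then
    aLoop template 0 (template.length - 1)
  else
    -- indexing the first element: on the empty list Python raises IndexError (excluded by Pre_)
    !(decide ((PySem.List.pyGet? template 0).getD 0 = 0)) = false

-- ===== PORT B =====
def validate_template_py_alt (template : List Int) : Bool :=
  if template.length > 1 then
    template == (List.range template.length).map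
      (fun (i : Nat) => (PySem.List.pyGet? template 0).getD 0 + (i : Int))
  else
    decide ((PySem.List.pyGet? template 0).getD 0 = 0)

-- ===== PRECONDITION & SPEC =====
-- Pre_ excludes only the empty list, on which both A and B raise IndexError (template[0]).
def Pre_validate_template_py (template : List Int) : Prop := template ≠ []
instance (template : List Int) : Decidable (Pre_validate_template_py template) := by
  unfold Pre_validate_template_py; infer_instance
def pvWitness_validate_template_py : List Int := [-2, -1, 0]

def Spec_validate_template_py (template : List Int) (out : Bool) : Prop := out = validate_template_py_alt template
instance (template : List Int) (out : Bool) : Decidable (Spec_validate_template_py template out) := by unfold Spec_validate_template_py; infer_instance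

-- ===== CLAIM (what is proved, stated in full; the proofs are below) =====
def Claim_equal_validate_template_py : Prop := ∀ (template : List Int), Dom_validate_template_py template → Pre_validate_template_py template → Spec_validate_template_py template (validate_template_py template)

-- ===== LEMMAS AND PROOFS =====

-- element access with a Nat index, for the proofs
def pvG (t : List Int) (k : Nat) : Int := (PySem.List.pyGet? t (k : Int)).getD 0

theorem aLoop_succ (t : List Int) (i n : Nat) :
    aLoop t i (n + 1) =
      if pvG t i - pvG t (i + 1) ≠ -1 then false else aLoop t (i + 1) n := by
  have e : ((i : Int) + 1) = ((i + 1 : Nat) : Int) := by push_cast; ring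
  simp only [aLoop, pvG, e]
  rfl

-- A's loop decides: every remaining adjacent pair is consecutive ascending
theorem aLoop_eq (t : List Int) (n : Nat) : ∀ i : Nat,
    aLoop t i n = decide (∀ j : Nat, j < n → pvG t (i + j) + 1 = pvG t (i + j + 1)) := by
  induction n with
  | zero => intro i; simp [aLoop]
  | succ n ih =>
    intro i
    rw [aLoop_succ, ih (i + 1)]
    by_cases h : pvG t i + 1 = pvG t (i + 1)
    · have hc : ¬ (pvG t i - pvG t (i + 1) ≠ -1) := by omega
      rw [if_neg hc]
      congr 1; apply propext
      constructor
      · intro hall j hj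
        match j with
        | 0 => simpa using h
        | k + 1 =>
          have e1 : i + (k + 1) = i + 1 + k := by omega
          rw [e1]; exact hall k (by omega)
      · intro hall j hj
        have := hall (j + 1) (by omega)
        have e1 : i + (j + 1) = i + 1 + j := by omega
        rw [e1] at this; exact this
    · have hc : pvG t i - pvG t (i + 1) ≠ -1 := by omega
      rw [if_pos hc]
      symm; rw [decide_eq_false_iff_not]
      intro hall
      exact h (by simpa using hall 0 (by omega))

-- B's list equality decides: every element equals head + index
theorem alt_eq (t : List Int) :
    (t == (List.range t.length).map (fun (i : Nat) => (PySem.List.pyGet? t 0).getD 0 + (i : Int)))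
    = decide (∀ j : Nat, j < t.length → pvG t j = pvG t 0 + j) := by
  rw [beq_eq_decide]
  congr 1; apply propext
  have h0 : (PySem.List.pyGet? t 0).getD 0 = pvG t 0 := by
    simp [pvG]
  constructor
  · intro heq j hj
    have hj' : j < ((List.range t.length).map
        (fun (i : Nat) => (PySem.List.pyGet? t 0).getD 0 + (i : Int))).length := by simpa using hj
    have : t[j]'hj = ((List.range t.length).map
        (fun (i : Nat) => (PySem.List.pyGet? t 0).getD 0 + (i : Int)))[j]'hj' := by
      simp only [List.getElem_of_eq heq]
    simp only [List.getElem_map, List.getElem_range, h0] at this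
    simp [pvG, PySem.List.pyGet?_natCast, List.getElem?_eq_getElem hj, this]
  · intro hall
    apply List.ext_getElem
    · simp
    · intro j hj hj'
      simp only [List.getElem_map, List.getElem_range, h0]
      have := hall j hj
      simp [pvG, PySem.List.pyGet?_natCast, List.getElem?_eq_getElem hj] at this
      simpa using this

-- bridge: adjacent-consecutive ↔ each element = head + index
theorem chain_iff (t : List Int) :
    (∀ j : Nat, j < t.length - 1 → pvG t j + 1 = pvG t (j + 1))
    ↔ (∀ j : Nat, j < t.length → pvG t j = pvG t 0 + j) := by
  constructor
  · intro h j hj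
    induction j with
    | zero => simp
    | succ k ih =>
      have hk := ih (by omega)
      have := h k (by omega)
      rw [← this, hk]
      push_cast; ring
  · intro h j hj
    have h1 := h j (by omega)
    have h2 := h (j + 1) (by omega)
    rw [h1, h2]
    push_cast; ring

-- ===== VERDICT (by name: the statement is the Claim_ definition above) =====
theorem validate_template_py_spec : Claim_equal_validate_template_py := by
  intro template _ _
  unfold Spec_validate_template_py validate_template_py validate_template_py_alt
  by_cases hl : template.length > 1
  · simp only [if_pos hl]
    rw [aLoop_eq, alt_eq]
    congr 1
    apply propext
    have := chain_iff template
    simpa using this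
  · simp only [if_neg hl]
    cases h : decide ((PySem.List.pyGet? template 0).getD 0 = 0) <;> simp_all
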